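-- pv_equiv track=rewrite | github.com/olgaobiols/sbc_cbr_i_recomanacio | src/operadors_begudes.py | get_ingredient_principal
-- ===== SOURCE A (Python) =====
-- def _first_present(row, keys):
--     for key in keys:
--         value = row.get(key)
--         if value not in (None, ""):
--             return value
--     return ""
--
-- def _normalize_key(value):
--     return str(value or "").strip().lower()
--
-- def _normalize_ingredient_row(ing_row):
--     out = dict(ing_row)
--     out["nom_ingredient"] = _first_present(out, ("nom_ingredient", "ingredient_name", "name"))
--     out["rol_tipic"] = _first_present(out, ("rol_tipic", "typical_role", "role"))
--     out["familia"] = _first_present(out, ("familia", "family"))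
--     out["categoria_macro"] = _first_present(out, ("categoria_macro", "macro_category"))
--     out["sabors_base"] = _first_present(out, ("sabors_base", "base_flavors"))
--     return out
--
-- def get_ingredient_principal(plat, base_ingredients):
--     """Retorna l'ingredient del plat amb typical_role = main."""
--     ingredient_principal = None
--     llista_ingredients = []
--
--     for ing in plat.get("ingredients", []):
--         ing_key = _normalize_key(ing)
--         for ing_row in base_ingredients:
--             row_name = _normalize_key(
--                 _first_present(ing_row, ("nom_ingredient", "ingredient_name", "name"))
--             )
--             if row_name == ing_key:
--                 norm_row = _normalize_ingredient_row(ing_row)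
--                 llista_ingredients.append(norm_row)
--                 if norm_row.get('rol_tipic') == "main":
--                     ingredient_principal = norm_row
--
--     # Fallback: si no hi ha ingredient principal, escollim el primer ingredient reconegut
--     if ingredient_principal is None and llista_ingredients:
--         ingredient_principal = llista_ingredients[0]
--
--     # Treu l'ingredient principal de la llista d'altres ingredients
--     llista_ingredients_filtrada = [
--         ing for ing in llista_ingredients
--         if ing != ingredient_principal
--     ]
--
--     return ingredient_principal, llista_ingredients_filtrada
-- ===== SOURCE B (Python) =====
-- _NORM_SPEC = (
--     ("nom_ingredient", ("nom_ingredient", "ingredient_name", "name")),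
--     ("rol_tipic", ("rol_tipic", "typical_role", "role")),
--     ("familia", ("familia", "family")),
--     ("categoria_macro", ("categoria_macro", "macro_category")),
--     ("sabors_base", ("sabors_base", "base_flavors")),
-- )
--
-- def _coalesce(row, keys):
--     for k in keys:
--         v = row.get(k)
--         if v not in (None, ""):
--             return v
--     return ""
--
-- def _canon(value):
--     return str(value or "").strip().lower()
--
-- def _norm_row(row):
--     out = dict(row)
--     for key, alts in _NORM_SPEC:
--         out[key] = _coalesce(out, alts)
--     return out
--
-- def get_ingredient_principal(plat, base_ingredients):
--     """Retorna l'ingredient del plat amb typical_role = main."""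
--     # Index the ingredient base ONCE by canonical name -> normalized rows
--     # (in base order), so recognising a dish ingredient is a dict lookup
--     # instead of a scan of the whole base.
--     pairs = [(_canon(_coalesce(row, ("nom_ingredient", "ingredient_name", "name"))),
--               _norm_row(row)) for row in base_ingredients]
--     index = {}
--     for nm, nr in pairs:
--         index[nm] = index.get(nm, []) + [nr]
--     recognized = []
--     for ing in plat.get("ingredients", []):
--         recognized = recognized + index.get(_canon(ing), [])
--     # Principal: last recognized row with rol_tipic == "main", else first
--     # recognized row, else None.
--     principal = next((r for r in reversed(recognized) if r.get("rol_tipic") == "main"),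
--                      None)
--     if principal is None and recognized:
--         principal = recognized[0]
--     # Others: drop every row value-equal to the principal.
--     return principal, [r for r in recognized if r != principal]
-- ===== Notes on version B (the rewrite author's own statement) =====
-- stated objective: alternative
-- what changed: Replaces A's nested dish-ingredient x base-row matching scan by a dict index built once (canonical name -> list of normalized rows), so recognition is a hash lookup per dish ingredient and the inner scan of base_ingredients disappears; the principal is then picked by a separate reverse scan for the last 'main' row.
import Mathlib
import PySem

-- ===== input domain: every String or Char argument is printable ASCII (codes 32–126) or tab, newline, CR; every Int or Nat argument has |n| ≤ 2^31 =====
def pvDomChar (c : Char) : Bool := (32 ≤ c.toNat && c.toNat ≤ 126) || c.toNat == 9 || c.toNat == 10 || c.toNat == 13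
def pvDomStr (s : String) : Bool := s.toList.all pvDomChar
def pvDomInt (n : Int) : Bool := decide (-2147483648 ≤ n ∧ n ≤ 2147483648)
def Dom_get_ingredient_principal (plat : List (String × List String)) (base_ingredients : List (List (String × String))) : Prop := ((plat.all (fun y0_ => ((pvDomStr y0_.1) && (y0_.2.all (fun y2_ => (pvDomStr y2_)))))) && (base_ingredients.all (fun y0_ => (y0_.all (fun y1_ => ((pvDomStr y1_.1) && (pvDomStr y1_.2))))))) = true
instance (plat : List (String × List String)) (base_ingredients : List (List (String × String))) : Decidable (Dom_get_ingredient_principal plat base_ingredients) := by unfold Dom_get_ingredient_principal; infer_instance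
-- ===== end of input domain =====

-- B replaces A's nested matching scan by a dict index (canonical name -> normalized rows)
-- built once over the base, so recognising a dish ingredient is one lookup; alternative
-- algorithm, same results.

-- ===== PORT A =====
-- row names probed by both programs
def pvNameKeys : List String := ["nom_ingredient", "ingredient_name", "name"]

-- _first_present: first key whose value is present and non-empty
def firstPresent (d : PySem.Dict String String) : List String → String
  | [] => ""
  | k :: ks =>
    match d.get? k with
    | none => firstPresent d ks
    | some v => if v = "" then firstPresent d ks else v

-- _normalize_key: str(value or "").strip().lower()  (value is a string here)
def normalizeKey (v : String) : String :=
  PySem.Str.lower (PySem.Str.strip (if v = "" then "" else v))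

-- _normalize_ingredient_row: overwrite the five canonical keys, in order, on the evolving dict
def normalizeRow (d : PySem.Dict String String) : PySem.Dict String String :=
  let d1 := d.insert "nom_ingredient" (firstPresent d pvNameKeys)
  let d2 := d1.insert "rol_tipic" (firstPresent d1 ["rol_tipic", "typical_role", "role"])
  let d3 := d2.insert "familia" (firstPresent d2 ["familia", "family"])
  let d4 := d3.insert "categoria_macro" (firstPresent d3 ["categoria_macro", "macro_category"])
  d4.insert "sabors_base" (firstPresent d4 ["sabors_base", "base_flavors"])

-- Python's '==' on dicts ignores insertion order: same size and every item of d found in e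
def pyDictEq (d e : PySem.Dict String String) : Bool :=
  d.size == e.size && d.items.all (fun kv => e.get? kv.1 == some kv.2)

def get_ingredient_principal (plat : List (String × List String)) (base_ingredients : List (List (String × String))) : (Option (List (String × String))) × (List (List (String × String))) :=
  let st := ((PySem.Dict.ofList plat).getD "ingredients" []).foldl
    (fun st ing =>
      let ingKey := normalizeKey ing
      base_ingredients.foldl
        (fun st ingRow =>
          let d := PySem.Dict.ofList ingRow
          let rowName := normalizeKey (firstPresent d pvNameKeys)
          if rowName = ingKey then
            let nr := normalizeRow d
            (if nr.get? "rol_tipic" == some "main" then some nr else st.1, st.2 ++ [nr])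
          else st)
        st)
    ((none, []) : Option (PySem.Dict String String) × List (PySem.Dict String String))
  let principal := match st.1 with
    | some p => some p
    | none => st.2.head?   -- fallback: first recognized ingredient, None if list empty
  let filtered := match principal with
    | none => st.2         -- 'dict != None' is always True
    | some p => st.2.filter (fun d => !(pyDictEq d p))
  (principal.map (·.items), filtered.map (·.items))

-- ===== PORT B =====
def pvNormSpec : List (String × List String) :=
  [("nom_ingredient", ["nom_ingredient", "ingredient_name", "name"]),
   ("rol_tipic", ["rol_tipic", "typical_role", "role"]),
   ("familia", ["familia", "family"]),
   ("categoria_macro", ["categoria_macro", "macro_category"]),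
   ("sabors_base", ["sabors_base", "base_flavors"])]

-- _coalesce (same loop as a helper of A's module)
def coalesceB (d : PySem.Dict String String) : List String → String
  | [] => ""
  | k :: ks =>
    match d.get? k with
    | none => coalesceB d ks
    | some v => if v = "" then coalesceB d ks else v

-- _canon: str(value or "").strip().lower()
def canonB (v : String) : String :=
  PySem.Str.lower (PySem.Str.strip (if v = "" then "" else v))

-- _norm_row: fold the spec table over the evolving dict
def normB (d : PySem.Dict String String) : PySem.Dict String String :=
  pvNormSpec.foldl (fun acc ks => acc.insert ks.1 (coalesceB acc ks.2)) d

def get_ingredient_principal_alt (plat : List (String × List String)) (base_ingredients : List (List (String × String))) : (Option (List (String × String))) × (List (List (String × String))) :=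
  let pairs := base_ingredients.map (fun row =>
    let d := PySem.Dict.ofList row
    (canonB (coalesceB d ["nom_ingredient", "ingredient_name", "name"]), normB d))
  -- index[nm] = index.get(nm, []) + [nr]
  let index := pairs.foldl
    (fun idx p => idx.modify p.1 [] (· ++ [p.2]))
    (PySem.Dict.ofList ([] : List (String × List (PySem.Dict String String))))
  -- recognized = recognized + index.get(canon(ing), [])
  let recognized := ((PySem.Dict.ofList plat).getD "ingredients" []).foldl
    (fun acc ing => acc ++ index.getD (canonB ing) []) []
  let principal := match recognized.reverse.find? (fun d => d.get? "rol_tipic" == some "main") with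
    | some p => some p
    | none => recognized.head?
  let others := match principal with
    | none => recognized
    | some p => recognized.filter (fun d => !(pyDictEq d p))
  (principal.map (·.items), others.map (·.items))

-- ===== PRECONDITION & SPEC =====
def Spec_get_ingredient_principal (plat : List (String × List String)) (base_ingredients : List (List (String × String))) (out : (Option (List (String × String))) × (List (List (String × String)))) : Prop := out = get_ingredient_principal_alt plat base_ingredients
instance (plat : List (String × List String)) (base_ingredients : List (List (String × String))) (out : (Option (List (String × String))) × (List (List (String × String)))) : Decidable (Spec_get_ingredient_principal plat base_ingredients out) := by unfold Spec_get_ingredient_principal; infer_instance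

-- ===== CLAIM (what is proved, stated in full; the proofs are below) =====
def Claim_equal_get_ingredient_principal : Prop := ∀ (plat : List (String × List String)) (base_ingredients : List (List (String × String))), Dom_get_ingredient_principal plat base_ingredients → Spec_get_ingredient_principal plat base_ingredients (get_ingredient_principal plat base_ingredients)

-- ===== LEMMAS AND PROOFS =====

theorem coalesceB_eq (d : PySem.Dict String String) (keys : List String) :
    coalesceB d keys = firstPresent d keys := by
  induction keys with
  | nil => rfl
  | cons k ks ih => simp only [coalesceB, firstPresent, ih]

theorem canonB_eq (v : String) : normalizeKey v = canonB v := rfl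

theorem normB_eq (d : PySem.Dict String String) : normB d = normalizeRow d := by
  simp [normB, pvNormSpec, normalizeRow, List.foldl, coalesceB_eq, pvNameKeys]

def isMain (d : PySem.Dict String String) : Bool := d.get? "rol_tipic" == some "main"

def matchesA (base : List (List (String × String))) (k : String) :
    List (PySem.Dict String String) :=
  base.filterMap (fun row =>
    let d := PySem.Dict.ofList row
    if normalizeKey (firstPresent d pvNameKeys) = k then some (normalizeRow d) else none)

def updP (o : Option (PySem.Dict String String)) (l : List (PySem.Dict String String)) :
    Option (PySem.Dict String String) :=
  match l.reverse.find? isMain with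
  | some d => some d
  | none => o

theorem updP_append (o : Option (PySem.Dict String String)) (l₁ l₂ : List (PySem.Dict String String)) :
    updP (updP o l₁) l₂ = updP o (l₁ ++ l₂) := by
  unfold updP
  rw [List.reverse_append, List.find?_append]
  cases l₂.reverse.find? isMain <;> simp [Option.or]

theorem updP_cons (o : Option (PySem.Dict String String)) (d : PySem.Dict String String)
    (l : List (PySem.Dict String String)) :
    updP o (d :: l) = updP (if isMain d then some d else o) l := by
  unfold updP
  rw [show (d :: l).reverse = l.reverse ++ [d] by simp, List.find?_append]
  cases hf : l.reverse.find? isMain with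
  | some e => simp [Option.or]
  | none => by_cases hm : isMain d <;> simp [List.find?, hm, Option.or]

theorem innerFold (base : List (List (String × String))) (k : String)
    (st : Option (PySem.Dict String String) × List (PySem.Dict String String)) :
    base.foldl
      (fun st ingRow =>
        let d := PySem.Dict.ofList ingRow
        let rowName := normalizeKey (firstPresent d pvNameKeys)
        if rowName = k then
          let nr := normalizeRow d
          (if nr.get? "rol_tipic" == some "main" then some nr else st.1, st.2 ++ [nr])
        else st)
      st = (updP st.1 (matchesA base k), st.2 ++ matchesA base k) := by
  induction base generalizing st with
  | nil => simp [matchesA, updP]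
  | cons row rest ih =>
    simp only [List.foldl, matchesA, List.filterMap]
    by_cases h : normalizeKey (firstPresent (PySem.Dict.ofList row) pvNameKeys) = k
    · rw [ih]
      simp only [h, if_pos, matchesA, Prod.mk.injEq]
      refine ⟨?_, by simp⟩
      rw [updP_cons]
      simp [isMain]
    · rw [ih]; simp [h, matchesA]

theorem outerFold (base : List (List (String × String))) (ings : List String)
    (st : Option (PySem.Dict String String) × List (PySem.Dict String String)) :
    ings.foldl
      (fun st ing =>
        let ingKey := normalizeKey ing
        base.foldl
          (fun st ingRow =>
            let d := PySem.Dict.ofList ingRow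
            let rowName := normalizeKey (firstPresent d pvNameKeys)
            if rowName = ingKey then
              let nr := normalizeRow d
              (if nr.get? "rol_tipic" == some "main" then some nr else st.1, st.2 ++ [nr])
            else st)
          st)
      st
    = (updP st.1 (ings.flatMap (fun ing => matchesA base (normalizeKey ing))),
       st.2 ++ ings.flatMap (fun ing => matchesA base (normalizeKey ing))) := by
  induction ings generalizing st with
  | nil => simp [updP]
  | cons ing rest ih =>
    simp only [List.foldl, List.flatMap_cons]
    rw [innerFold, ih, updP_append]
    simp

-- the index lookup recovers exactly A's matching rows, in base order
theorem indexLookup (base : List (List (String × String))) (k : String) :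
    ((base.map (fun row =>
        let d := PySem.Dict.ofList row
        (canonB (coalesceB d ["nom_ingredient", "ingredient_name", "name"]), normB d))).foldl
      (fun idx p => idx.modify p.1 [] (· ++ [p.2]))
      (PySem.Dict.ofList ([] : List (String × List (PySem.Dict String String))))).getD k []
    = matchesA base k := by
  rw [PySem.Dict.getD_foldl_modify_append]
  have h0 : (PySem.Dict.ofList ([] : List (String × List (PySem.Dict String String)))).getD k [] = [] := rfl
  rw [h0, List.nil_append]
  induction base with
  | nil => rfl
  | cons row rest ih =>
    have e1 : canonB (coalesceB (PySem.Dict.ofList row) ["nom_ingredient", "ingredient_name", "name"])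
        = normalizeKey (firstPresent (PySem.Dict.ofList row) pvNameKeys) := by
      rw [coalesceB_eq]; rfl
    simp only [List.map_cons, List.filter_cons, matchesA, List.filterMap_cons] at *
    by_cases h : normalizeKey (firstPresent (PySem.Dict.ofList row) pvNameKeys) = k
    · simp only [e1, h, BEq.rfl, if_pos, List.map_cons]
      rw [ih, normB_eq]
    · have hb : (normalizeKey (firstPresent (PySem.Dict.ofList row) pvNameKeys) == k) = false := by
        simpa using h
      simp only [e1, hb, Bool.false_eq_true, if_neg, h, ih, not_false_iff]

-- ===== VERDICT (by name: the statement is the Claim_ definition above) =====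
theorem get_ingredient_principal_spec : Claim_equal_get_ingredient_principal := by
  intro plat base _
  unfold Spec_get_ingredient_principal get_ingredient_principal get_ingredient_principal_alt
  simp only [outerFold, List.nil_append]
  have hrec : (((PySem.Dict.ofList plat).getD "ingredients" []).foldl
      (fun acc ing => acc ++
        (((base.map (fun row =>
            let d := PySem.Dict.ofList row
            (canonB (coalesceB d ["nom_ingredient", "ingredient_name", "name"]), normB d))).foldl
          (fun idx p => idx.modify p.1 [] (· ++ [p.2]))
          (PySem.Dict.ofList ([] : List (String × List (PySem.Dict String String))))).getD (canonB ing) [])) [])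
      = ((PySem.Dict.ofList plat).getD "ingredients" []).flatMap
          (fun ing => matchesA base (normalizeKey ing)) := by
    rw [PySem.List.foldl_append_eq_flatMap]
    simp only [List.nil_append]
    refine List.flatMap_congr (fun ing _ => ?_)
    rw [indexLookup, canonB_eq]
  simp only [hrec]
  set R := ((PySem.Dict.ofList plat).getD "ingredients" []).flatMap
    (fun ing => matchesA base (normalizeKey ing)) with hR
  unfold updP
  have hp : (fun d : PySem.Dict String String => d.get? "rol_tipic" == some "main") = isMain := rfl
  rw [hp]
  cases hf : List.find? isMain R.reverse with
  | none => simp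
  | some p => simp
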